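-- pv_equiv track=rewrite | github.com/Gyoorey/aoc_2025 | 2/sol.py | check_value_all_substrings
-- ===== SOURCE A (Python) =====
-- def check_value_all_substrings(value: int) -> bool:
--     value_str = str(value)
--     length = len(value_str)
--     for size in range(1, length // 2 + 1):
--         if length % size != 0:
--             continue
--         substrings = [value_str[i:i + size]
--                       for i in range(0, length, size)]
--         if all(s == substrings[0] for s in substrings):
--             return True
--
--     return False
-- ===== SOURCE B (Python) =====
-- def check_value_all_substrings(value: int) -> bool:
--     s = str(value)
--     return s in (s + s)[1:-1]
-- ===== Notes on version B (the rewrite author's own statement) =====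
-- stated objective: idiomatic
-- what changed: Replaces the divisor-enumeration block comparison with the classic doubled-string trick: s is a repetition of a shorter block iff s occurs in (s+s)[1:-1], a single substring search.
import Mathlib
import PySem

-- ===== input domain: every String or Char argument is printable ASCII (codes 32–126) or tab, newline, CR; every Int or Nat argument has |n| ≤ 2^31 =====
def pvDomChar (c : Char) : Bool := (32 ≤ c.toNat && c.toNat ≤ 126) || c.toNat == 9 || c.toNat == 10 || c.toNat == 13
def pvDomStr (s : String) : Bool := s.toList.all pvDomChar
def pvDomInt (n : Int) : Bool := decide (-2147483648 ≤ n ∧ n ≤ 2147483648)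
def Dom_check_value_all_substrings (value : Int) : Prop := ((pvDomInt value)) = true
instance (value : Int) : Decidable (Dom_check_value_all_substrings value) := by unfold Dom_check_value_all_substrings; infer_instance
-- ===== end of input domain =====

-- B replaces A's divisor-enumeration block comparison by the doubled-string trick:
-- str(value) repeats a shorter block iff it occurs in (s+s)[1:-1]; same value everywhere, no speed claim.

-- ===== PORT A =====
def check_value_all_substrings (value : Int) : Bool :=
  let value_str := PySem.Int.toChars value
  let length : Int := (value_str.length : Int)
  (PySem.List.pyRange 1 (PySem.Int.floordiv length 2 + 1)).any (fun size =>
    if PySem.Int.mod length size != 0 then false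
    else
      let substrings := (PySem.List.pyRange 0 length size).map
        (fun i => PySem.List.slice value_str (some i) (some (i + size)))
      substrings.all (fun sub => sub == PySem.List.pyGetD substrings 0 []))

-- ===== PORT B =====
def check_value_all_substrings_alt (value : Int) : Bool :=
  let s := PySem.Int.toChars value
  PySem.Chars.isIn s (PySem.List.slice (s ++ s) (some 1) (some (-1)))

-- ===== PRECONDITION & SPEC =====
def Spec_check_value_all_substrings (value : Int) (out : Bool) : Prop := out = check_value_all_substrings_alt value
instance (value : Int) (out : Bool) : Decidable (Spec_check_value_all_substrings value out) := by unfold Spec_check_value_all_substrings; infer_instance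

-- ===== CLAIM (what is proved, stated in full; the proofs are below) =====
def Claim_equal_check_value_all_substrings : Prop := ∀ (value : Int), Dom_check_value_all_substrings value → Spec_check_value_all_substrings value (check_value_all_substrings value)

-- ===== LEMMAS AND PROOFS =====

-- str(value) is never the empty string
theorem pv_toChars_ne_nil (v : Int) : PySem.Int.toChars v ≠ [] := by
  unfold PySem.Int.toChars
  split
  · simp
  · have h := Nat.length_toDigits_pos (b := 10) (n := v.toNat)
    intro hnil
    rw [hnil] at h
    simp at h

-- rotation by a multiple of a fixed shift still fixes s
theorem pv_rotate_mul {α : Type} (s : List α) (d : ℕ) (h : s.rotate d = s) (t : ℕ) :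
    s.rotate (d * t) = s := by
  induction t with
  | zero => simp
  | succ t ih => rw [Nat.mul_succ, ← List.rotate_rotate, ih, h]

-- cancellation: if rotating by u+v and by v both fix s, so does rotating by u
theorem pv_rotate_of_add {α : Type} (s : List α) (u v : ℕ)
    (huv : s.rotate (u + v) = s) (hv : s.rotate v = s) : s.rotate u = s := by
  rcases Nat.eq_zero_or_pos s.length with h0 | hp
  · rw [List.eq_nil_of_length_eq_zero h0]
    simp
  · obtain ⟨n', hn'⟩ : ∃ n', s.length = n' + 1 := ⟨s.length - 1, by omega⟩
    have h1 : (s.rotate u).rotate v = s := by rw [List.rotate_rotate]; exact huv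
    have h2 : (s.rotate u).rotate (v * s.length) = s.rotate u := by
      rw [← List.length_rotate s u, mul_comm, List.rotate_length_mul]
    have h3 : (s.rotate u).rotate (v * s.length) = s := by
      have : v * s.length = v + v * n' := by rw [hn']; ring
      rw [this, ← List.rotate_rotate, h1]
      exact pv_rotate_mul s v hv n'
    rw [← h2, h3]

-- the fixed shifts are closed under gcd (Euclid's algorithm on rotations)
theorem pv_rotate_gcd {α : Type} (s : List α) (a b : ℕ)
    (ha : s.rotate a = s) (hb : s.rotate b = s) : s.rotate (Nat.gcd a b) = s := by
  induction a using Nat.strong_induction_on generalizing b with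
  | _ a ih =>
    rcases Nat.eq_zero_or_pos a with rfl | hapos
    · simpa using hb
    · rw [Nat.gcd_rec]
      have hq : s.rotate (a * (b / a)) = s := pv_rotate_mul s a ha _
      have hmod : s.rotate (b % a) = s := by
        refine pv_rotate_of_add s (b % a) (a * (b / a)) ?_ hq
        rw [Nat.mod_add_div]; exact hb
      exact ih (b % a) (Nat.mod_lt b hapos) a hmod ha

-- reading s.length characters of s++s from offset k is the rotation by k
theorem pv_doubled_take {α : Type} (s : List α) (k : ℕ) (hk : k ≤ s.length) :
    ((s ++ s).drop k).take s.length = s.rotate k := by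
  rw [List.drop_append_of_le_length hk, List.rotate_eq_drop_append_take hk]
  have h1 : s.length = (s.drop k).length + k := by simp [List.length_drop]; omega
  rw [h1, List.take_append]
  simp

-- all d-blocks equal b → s is b repeated
theorem pv_blocks_concat {α : Type} (d : ℕ) (_hd : 0 < d) :
    ∀ (m : ℕ) (s b : List α), s.length = d * m → (∀ q < m, (s.drop (d * q)).take d = b) →
      s = (List.replicate m b).flatten := by
  intro m
  induction m with
  | zero =>
    intro s b hlen _
    simp only [Nat.mul_zero, List.length_eq_zero_iff] at hlen
    simp [hlen]
  | succ m ih =>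
    intro s b hlen hq
    have hb : s.take d = b := by
      have := hq 0 (Nat.succ_pos m)
      simpa using this
    have hdroplen : (s.drop d).length = d * m := by
      rw [List.length_drop, hlen, Nat.mul_succ]; omega
    have hblocks : ∀ q < m, ((s.drop d).drop (d * q)).take d = b := by
      intro q hqm
      rw [List.drop_drop]
      have : d + d * q = d * (q + 1) := by ring
      rw [this]
      exact hq (q + 1) (by omega)
    have hrec := ih (s.drop d) b hdroplen hblocks
    calc s = s.take d ++ s.drop d := (List.take_append_drop d s).symm
      _ = b ++ (List.replicate m b).flatten := by rw [hb, hrec]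
      _ = (List.replicate (m + 1) b).flatten := by rw [List.replicate_succ, List.flatten_cons]

-- a block may be moved from either end of a repetition
theorem pv_flatten_replicate_comm {α : Type} (m : ℕ) (b : List α) :
    (List.replicate m b).flatten ++ b = b ++ (List.replicate m b).flatten := by
  have h1 : (List.replicate m b).flatten ++ b = (List.replicate (m + 1) b).flatten := by
    rw [List.replicate_succ', List.flatten_append]; simp
  have h2 : b ++ (List.replicate m b).flatten = (List.replicate (m + 1) b).flatten := by
    rw [List.replicate_succ, List.flatten_cons]
  rw [h1, h2]

-- for a divisor d of the length, A's block condition is rotation-invariance by d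
theorem pv_blocks_iff_rotate {α : Type} (s : List α) (d : ℕ) (hd : 0 < d)
    (hdvd : d ∣ s.length) (hs : 0 < s.length) :
    (∀ q < s.length / d, (s.drop (d * q)).take d = s.take d) ↔ s.rotate d = s := by
  have hdn : d ≤ s.length := Nat.le_of_dvd hs hdvd
  have hmul : d * (s.length / d) = s.length := Nat.mul_div_cancel' hdvd
  constructor
  · intro hq
    obtain ⟨m', hm'⟩ : ∃ m', s.length / d = m' + 1 :=
      ⟨s.length / d - 1, by have := Nat.div_pos hdn hd; omega⟩
    set b := s.take d with hbdef
    have hconcat := pv_blocks_concat d hd (s.length / d) s b hmul.symm hq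
    have hblen : b.length = d := by rw [hbdef]; simp [List.length_take]; omega
    have hsplit : s = b ++ (List.replicate m' b).flatten := by
      conv_lhs => rw [hconcat]
      rw [hm', List.replicate_succ, List.flatten_cons]
    have hdrop : s.drop d = (List.replicate m' b).flatten := by
      conv_lhs => rw [hsplit]
      rw [← hblen, List.drop_left]
    rw [List.rotate_eq_drop_append_take hdn, hdrop, ← hbdef]
    conv_rhs => rw [hsplit]
    exact pv_flatten_replicate_comm m' b
  · intro hrot q hqm
    have hle : d * q + d ≤ s.length := by
      have : q + 1 ≤ s.length / d := hqm
      calc d * q + d = d * (q + 1) := by ring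
        _ ≤ d * (s.length / d) := Nat.mul_le_mul_left d this
        _ = s.length := hmul
    have hrotq : s.rotate (d * q) = s := pv_rotate_mul s d hrot q
    have hdk : d * q ≤ s.length := by omega
    have := List.rotate_eq_drop_append_take hdk (l := s)
    rw [hrotq] at this
    have htake := congrArg (List.take d) this
    rw [List.take_append_of_le_length (by simp [List.length_drop]; omega)] at htake
    exact htake.symm

-- the number-theoretic bridge: some shift in [1, n-1] fixes s iff some divisor ≤ n/2 does
theorem pv_div_iff_rot {α : Type} (s : List α) (hs : 0 < s.length) :
    (∃ d, 1 ≤ d ∧ d ≤ s.length / 2 ∧ d ∣ s.length ∧ s.rotate d = s) ↔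
    (∃ k, 1 ≤ k ∧ k < s.length ∧ s.rotate k = s) := by
  constructor
  · rintro ⟨d, h1, h2, _, h4⟩
    exact ⟨d, h1, by have := Nat.div_lt_self hs (by norm_num : 1 < 2); omega, h4⟩
  · rintro ⟨k, h1, h2, h3⟩
    refine ⟨Nat.gcd k s.length, ?_, ?_, Nat.gcd_dvd_right k s.length,
      pv_rotate_gcd s k s.length h3 (List.rotate_length s)⟩
    · exact Nat.gcd_pos_of_pos_right k hs
    · have hgk : Nat.gcd k s.length ≤ k := Nat.gcd_le_left s.length (by omega)
      obtain ⟨t, ht⟩ := Nat.gcd_dvd_right k s.length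
      have hg : 0 < Nat.gcd k s.length := Nat.gcd_pos_of_pos_right k hs
      have ht2 : 2 ≤ t := by
        rcases Nat.lt_or_ge t 2 with h | h
        · interval_cases t <;> omega
        · exact h
      rw [Nat.le_div_iff_mul_le (by norm_num : 0 < 2)]
      calc Nat.gcd k s.length * 2 ≤ Nat.gcd k s.length * t := Nat.mul_le_mul_left _ ht2
        _ = s.length := ht.symm

-- characterisation of B's body: occurrence in (s+s)[1:-1] is a fixing rotation
theorem pv_alt_char (s : List Char) (hs : s ≠ []) :
    PySem.Chars.isIn s (PySem.List.slice (s ++ s) (some 1) (some (-1))) = true ↔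
    (∃ k, 1 ≤ k ∧ k < s.length ∧ s.rotate k = s) := by
  have hn : 0 < s.length := List.length_pos_of_ne_nil hs
  set n := s.length with hndef
  have hslice : PySem.List.slice (s ++ s) (some 1) (some (-1)) =
      ((s ++ s).drop 1).take (2 * n - 2) := by
    simp [PySem.List.slice]
    have hmin : min 1 (s.length + s.length) = 1 := by omega
    rw [hmin, List.drop_one]
    congr 1
    omega
  rw [hslice, ← PySem.Chars.exists_prefix_drop_iff_isIn]
  constructor
  · rintro ⟨j, hj⟩
    rw [List.drop_take, List.drop_drop] at hj
    have hjlen : n ≤ 2 * n - 2 - j := by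
      have := hj.length_le
      simp [List.length_take, List.length_drop, List.length_append] at this
      omega
    have hpre : s <+: (s ++ s).drop (1 + j) := hj.trans (List.take_prefix _ _)
    have hkle : 1 + j ≤ n := by omega
    have := List.prefix_iff_eq_take.mp hpre
    rw [← hndef] at this
    rw [pv_doubled_take s (1 + j) hkle] at this
    exact ⟨1 + j, by omega, by omega, this.symm⟩
  · rintro ⟨k, hk1, hkn, hrot⟩
    refine ⟨k - 1, ?_⟩
    rw [List.drop_take, List.drop_drop]
    have h1k : 1 + (k - 1) = k := by omega
    rw [h1k]
    have hs' : s = ((s ++ s).drop k).take n := by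
      rw [pv_doubled_take s k (by omega), hrot]
    conv_lhs => rw [hs']
    have htt : List.take n ((s ++ s).drop k) =
        List.take n (List.take (2 * n - 2 - (k - 1)) ((s ++ s).drop k)) := by
      rw [List.take_take]
      congr 1
      omega
    rw [htt]
    exact List.take_prefix _ _

-- the body of A's loop at size = d, for positive d
theorem pv_inner (s : List Char) (d : ℕ) (hd : 0 < d) (hn : 0 < s.length) :
    ((if PySem.Int.mod (s.length : Int) (d : Int) != 0 then false
      else
        let substrings := (PySem.List.pyRange 0 (s.length : Int) (d : Int)).map
          (fun i => PySem.List.slice s (some i) (some (i + (d : Int))))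
        substrings.all (fun sub => sub == PySem.List.pyGetD substrings 0 [])) = true) ↔
    (d ∣ s.length ∧ s.rotate d = s) := by
  by_cases hdvd : d ∣ s.length
  · have hmodz : PySem.Int.mod (s.length : Int) (d : Int) = 0 :=
      (PySem.Int.mod_eq_zero_iff_dvd _ _).mpr (Int.natCast_dvd_natCast.mpr hdvd)
    rw [hmodz]
    simp only [bne_self_eq_false, Bool.false_eq_true, if_false]
    set m := s.length / d with hmdef
    have hmul : d * m = s.length := Nat.mul_div_cancel' hdvd
    have hm1 : 1 ≤ m := Nat.div_pos (Nat.le_of_dvd hn hdvd) hd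
    have hcount : (if (0 : Int) < (s.length : Int) then
          (((s.length : Int) - 0 + (d : Int) - 1) / (d : Int)).toNat else 0) = m := by
      rw [if_pos (by exact_mod_cast hn)]
      have hcast : ((s.length : Int) - 0 + (d : Int) - 1) = ((s.length + d - 1 : ℕ) : Int) := by
        omega
      rw [hcast, ← Int.natCast_div, Int.toNat_natCast]
      have harith : s.length + d - 1 = (d - 1) + d * m := by omega
      rw [harith, Nat.add_mul_div_left _ _ hd, Nat.div_eq_of_lt (by omega), Nat.zero_add]
    have hrange : PySem.List.pyRange 0 (s.length : Int) (d : Int) =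
        (List.range m).map (fun (k : ℕ) => 0 + (d : Int) * (k : Int)) := by
      rw [PySem.List.pyRange_of_pos 0 (s.length : Int) (by exact_mod_cast hd), hcount]
    have hmapeq : (PySem.List.pyRange 0 (s.length : Int) (d : Int)).map
          (fun i => PySem.List.slice s (some i) (some (i + (d : Int)))) =
        (List.range m).map (fun q => (s.drop (d * q)).take d) := by
      rw [hrange, List.map_map]
      refine List.map_congr_left ?_
      intro q _
      simp only [Function.comp]
      have h0 : (0 : Int) + (d : Int) * (q : Int) = ((d * q : ℕ) : Int) := by push_cast; ring
      rw [h0, show ((d * q : ℕ) : Int) + (d : Int) = ((d * q : ℕ) : Int) + ((d : ℕ) : Int) from rfl,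
        PySem.List.slice_natCast_add]
    simp only [hmapeq]
    obtain ⟨m', hm'⟩ : ∃ m', m = m' + 1 := ⟨m - 1, by omega⟩
    have hget : PySem.List.pyGetD ((List.range m).map (fun q => (s.drop (d * q)).take d)) 0 [] =
        s.take d := by
      rw [PySem.List.pyGetD_of_nonneg _ _ (by norm_num)]
      rw [hm', List.range_succ_eq_map, List.map_cons]
      simp
    rw [hget]
    rw [List.all_eq_true]
    simp only [List.mem_map, List.mem_range]
    constructor
    · intro h
      refine ⟨hdvd, (pv_blocks_iff_rotate s d hd hdvd hn).mp ?_⟩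
      intro q hq
      exact eq_of_beq (h _ ⟨q, hq, rfl⟩)
    · rintro ⟨-, hrot⟩ x ⟨q, hq, rfl⟩
      have hblocks := (pv_blocks_iff_rotate s d hd hdvd hn).mpr hrot
      rw [hblocks q hq]
      exact beq_self_eq_true _
  · have hmodnz : PySem.Int.mod (s.length : Int) (d : Int) ≠ 0 := by
      intro h
      exact hdvd (Int.natCast_dvd_natCast.mp ((PySem.Int.mod_eq_zero_iff_dvd _ _).mp h))
    rw [if_pos (bne_iff_ne.mpr hmodnz)]
    simp [hdvd]

-- characterisation of A's body: some divisor block size ≤ n/2 tiles s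
theorem pv_a_char (s : List Char) (hs : s ≠ []) :
    ((PySem.List.pyRange 1 (PySem.Int.floordiv (s.length : Int) 2 + 1)).any (fun size =>
      if PySem.Int.mod (s.length : Int) size != 0 then false
      else
        let substrings := (PySem.List.pyRange 0 (s.length : Int) size).map
          (fun i => PySem.List.slice s (some i) (some (i + size)))
        substrings.all (fun sub => sub == PySem.List.pyGetD substrings 0 [])) = true) ↔
    (∃ d, 1 ≤ d ∧ d ≤ s.length / 2 ∧ d ∣ s.length ∧ s.rotate d = s) := by
  have hn : 0 < s.length := List.length_pos_of_ne_nil hs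
  have hfd : PySem.Int.floordiv (s.length : Int) 2 = ((s.length / 2 : ℕ) : Int) := by
    exact_mod_cast PySem.Int.floordiv_natCast s.length 2
  rw [List.any_eq_true]
  constructor
  · rintro ⟨size, hmem, hsz⟩
    rw [PySem.List.mem_pyRange_one, hfd] at hmem
    obtain ⟨hm1, hm2⟩ := hmem
    lift size to ℕ using (by omega) with d
    have hd1 : 1 ≤ d := by exact_mod_cast hm1
    have hd2 : d ≤ s.length / 2 := by
      have : (d : Int) < ((s.length / 2 : ℕ) : Int) + 1 := hm2
      omega
    rw [pv_inner s d (by omega) hn] at hsz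
    exact ⟨d, hd1, hd2, hsz.1, hsz.2⟩
  · rintro ⟨d, h1, h2, h3, h4⟩
    refine ⟨(d : Int), ?_, ?_⟩
    · rw [PySem.List.mem_pyRange_one, hfd]
      constructor
      · exact_mod_cast h1
      · have : (d : Int) ≤ ((s.length / 2 : ℕ) : Int) := by exact_mod_cast h2
        omega
    · rw [pv_inner s d (by omega) hn]
      exact ⟨h3, h4⟩

-- the two bodies agree on every nonempty string
theorem pv_main (s : List Char) (hs : s ≠ []) :
    ((PySem.List.pyRange 1 (PySem.Int.floordiv (s.length : Int) 2 + 1)).any (fun size =>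
      if PySem.Int.mod (s.length : Int) size != 0 then false
      else
        let substrings := (PySem.List.pyRange 0 (s.length : Int) size).map
          (fun i => PySem.List.slice s (some i) (some (i + size)))
        substrings.all (fun sub => sub == PySem.List.pyGetD substrings 0 []))) =
    PySem.Chars.isIn s (PySem.List.slice (s ++ s) (some 1) (some (-1))) := by
  have hn : 0 < s.length := List.length_pos_of_ne_nil hs
  rw [Bool.eq_iff_iff, pv_a_char s hs, pv_alt_char s hs]
  exact pv_div_iff_rot s hn

-- ===== VERDICT (by name: the statement is the Claim_ definition above) =====
theorem check_value_all_substrings_spec : Claim_equal_check_value_all_substrings := by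
  intro value _
  show check_value_all_substrings value = check_value_all_substrings_alt value
  exact pv_main (PySem.Int.toChars value) (pv_toChars_ne_nil value)
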